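-- pv_equiv track=rewrite | github.com/Andoree/generalized_boolean_polynoms | practice_sem_3/utils.py | get_longest_poly_monom_ids
-- ===== SOURCE A (Python) =====
-- from typing import Dict, Tuple, List
--
-- def get_longest_poly_monom_ids(minimum_poly2monom_ids: Dict[int, Tuple[int]]) -> Dict[int, Tuple[int]]:
--     longest_polys: Dict[int, Tuple[int]] = {}
--     max_length = max(len(t) for t in minimum_poly2monom_ids.values())
--     for poly_id, monom_ids in minimum_poly2monom_ids.items():
--         poly_length = len(monom_ids)
--         if poly_length == max_length:
--             longest_polys[poly_id] = monom_ids
--     return longest_polys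
-- ===== SOURCE B (Python) =====
-- def get_longest_poly_monom_ids(minimum_poly2monom_ids):
--     # Group entries by tuple length in one pass, then return the bucket of the
--     # maximal length; max() over the empty bucket index raises ValueError like A.
--     buckets = {}
--     for poly_id, monom_ids in minimum_poly2monom_ids.items():
--         buckets.setdefault(len(monom_ids), []).append((poly_id, monom_ids))
--     return dict(buckets[max(buckets)])
-- ===== Notes on version B (the rewrite author's own statement) =====
-- stated objective: alternative
-- what changed: Instead of precomputing the maximum length and then filtering, B groups the entries by tuple length into a bucket dict in one pass and returns the bucket of the maximal length key.
import Mathlib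
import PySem

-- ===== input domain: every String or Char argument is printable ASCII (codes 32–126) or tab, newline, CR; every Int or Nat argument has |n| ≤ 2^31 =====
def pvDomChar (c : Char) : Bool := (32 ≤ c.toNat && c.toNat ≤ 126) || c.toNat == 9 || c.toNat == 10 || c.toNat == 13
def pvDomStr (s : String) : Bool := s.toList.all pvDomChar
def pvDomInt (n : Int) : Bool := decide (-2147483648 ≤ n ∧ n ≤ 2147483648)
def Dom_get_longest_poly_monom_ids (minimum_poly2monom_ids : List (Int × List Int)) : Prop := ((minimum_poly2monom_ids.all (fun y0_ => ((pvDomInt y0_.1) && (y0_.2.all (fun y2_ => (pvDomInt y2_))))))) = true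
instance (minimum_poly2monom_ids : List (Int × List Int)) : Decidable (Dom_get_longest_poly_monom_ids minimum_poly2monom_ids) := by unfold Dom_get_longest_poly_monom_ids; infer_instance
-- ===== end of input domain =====

-- B groups entries by tuple length into a bucket dict in one pass and returns the
-- maximal-length bucket; same result as A's precompute-max-then-filter (alternative, not faster).

-- ===== PORT A =====
def get_longest_poly_monom_ids (minimum_poly2monom_ids : List (Int × List Int)) : List (Int × List Int) :=
  -- max(len(t) for t in d.values()); on an empty dict Python raises ValueError (excluded by Pre_)
  match PySem.List.max? (minimum_poly2monom_ids.map (fun kv => (kv.2.length : Int))) (fun x => x) with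
  | none => []
  | some max_length =>
    (minimum_poly2monom_ids.foldl
      (fun longest_polys kv =>
        if (kv.2.length : Int) = max_length then longest_polys.insert kv.1 kv.2 else longest_polys)
      (PySem.Dict.empty : PySem.Dict Int (List Int))).items

-- ===== PORT B =====
def get_longest_poly_monom_ids_alt (minimum_poly2monom_ids : List (Int × List Int)) : List (Int × List Int) :=
  let buckets := minimum_poly2monom_ids.foldl
    (fun b kv => b.modify ((kv.2.length : Int)) [] (· ++ [kv]))
    (PySem.Dict.empty : PySem.Dict Int (List (Int × List Int)))
  -- max(buckets) iterates the keys; raises ValueError on an empty dict (excluded by Pre_)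
  match PySem.List.max? buckets.keys (fun x => x) with
  | none => []
  | some m => (PySem.Dict.ofList (buckets.getD m [])).items

-- ===== PRECONDITION & SPEC =====
-- Pre_ excludes exactly the empty dict, on which A's max() raises ValueError (B's max() does too).
def Pre_get_longest_poly_monom_ids (minimum_poly2monom_ids : List (Int × List Int)) : Prop :=
  minimum_poly2monom_ids ≠ []
instance (minimum_poly2monom_ids : List (Int × List Int)) : Decidable (Pre_get_longest_poly_monom_ids minimum_poly2monom_ids) := by unfold Pre_get_longest_poly_monom_ids; infer_instance

def pvWitness_get_longest_poly_monom_ids : (List (Int × List Int)) := [(1, [3, 4]), (2, [5])]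

def Spec_get_longest_poly_monom_ids (minimum_poly2monom_ids : List (Int × List Int)) (out : List (Int × List Int)) : Prop := out = get_longest_poly_monom_ids_alt minimum_poly2monom_ids
instance (minimum_poly2monom_ids : List (Int × List Int)) (out : List (Int × List Int)) : Decidable (Spec_get_longest_poly_monom_ids minimum_poly2monom_ids out) := by unfold Spec_get_longest_poly_monom_ids; infer_instance

-- ===== CLAIM (what is proved, stated in full; the proofs are below) =====
def Claim_equal_get_longest_poly_monom_ids : Prop := ∀ (minimum_poly2monom_ids : List (Int × List Int)), Dom_get_longest_poly_monom_ids minimum_poly2monom_ids → Pre_get_longest_poly_monom_ids minimum_poly2monom_ids → Spec_get_longest_poly_monom_ids minimum_poly2monom_ids (get_longest_poly_monom_ids minimum_poly2monom_ids)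

-- ===== LEMMAS AND PROOFS =====

-- The bucket fold's entry at key m is the filtered sublist of the input, appended in order.
theorem bucket_getD (l : List (Int × List Int)) (b : PySem.Dict Int (List (Int × List Int))) (m : Int) :
    (l.foldl (fun b kv => b.modify ((kv.2.length : Int)) [] (· ++ [kv])) b).getD m []
      = b.getD m [] ++ l.filter (fun kv => (kv.2.length : Int) = m) := by
  induction l generalizing b with
  | nil => simp
  | cons h t ih =>
    simp only [List.foldl_cons, ih, List.filter_cons]
    rw [PySem.Dict.getD_modify]
    by_cases hm : ((h.2.length : Int) = m)
    · simp [hm]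
    · simp [hm, Ne.symm hm]

-- A's filtering insert loop is the plain insert loop over the filtered list.
theorem foldl_insert_filter (l : List (Int × List Int)) (acc : PySem.Dict Int (List Int)) (p : Int × List Int → Prop) [DecidablePred p] :
    l.foldl (fun acc kv => if p kv then acc.insert kv.1 kv.2 else acc) acc
      = (l.filter (fun kv => decide (p kv))).foldl (fun acc kv => acc.insert kv.1 kv.2) acc := by
  induction l generalizing acc with
  | nil => rfl
  | cons h t ih =>
    simp only [List.foldl_cons, List.filter_cons]
    by_cases hp : p h <;> simp [hp, ih]

-- max? with identity key gives the same value on any two nonempty lists with the same elements.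
theorem max?_id_mem_equiv (l l' : List Int) (h : ∀ x, x ∈ l ↔ x ∈ l') (hne : l ≠ []) :
    PySem.List.max? l (fun x => x) = PySem.List.max? l' (fun x => x) := by
  have hne' : l' ≠ [] := by
    cases l with
    | nil => exact absurd rfl hne
    | cons a t =>
      intro hl'
      have := (h a).mp (List.mem_cons_self)
      simp [hl'] at this
  rcases hm : PySem.List.max? l (fun x => x) with _ | m
  · exact absurd ((PySem.List.max?_eq_none_iff _ _).mp hm) hne
  rcases hm' : PySem.List.max? l' (fun x => x) with _ | m'
  · exact absurd ((PySem.List.max?_eq_none_iff _ _).mp hm') hne'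
  have h1 : m ∈ l := PySem.List.max?_mem hm
  have h2 : m' ∈ l' := PySem.List.max?_mem hm'
  have h3 : m ≤ m' := PySem.List.max?_isMax hm' m ((h m).mp h1)
  have h4 : m' ≤ m := PySem.List.max?_isMax hm m' ((h m').mpr h2)
  exact congrArg some (le_antisymm h3 h4)

-- ===== VERDICT (by name: the statement is the Claim_ definition above) =====
theorem get_longest_poly_monom_ids_spec : Claim_equal_get_longest_poly_monom_ids := by
  intro d _ hpre
  unfold Spec_get_longest_poly_monom_ids get_longest_poly_monom_ids get_longest_poly_monom_ids_alt
  have hkeys : (d.foldl (fun b kv => b.modify ((kv.2.length : Int)) [] (· ++ [kv]))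
      (PySem.Dict.empty : PySem.Dict Int (List (Int × List Int)))).keys
      = PySem.Set.ofList (d.map (fun kv => (kv.2.length : Int))) := by
    rw [PySem.Dict.keys_foldl_modify_key]
    rfl
  have hmaxeq : PySem.List.max? ((d.foldl (fun b kv => b.modify ((kv.2.length : Int)) [] (· ++ [kv]))
        (PySem.Dict.empty : PySem.Dict Int (List (Int × List Int)))).keys) (fun x => x)
      = PySem.List.max? (d.map (fun kv => (kv.2.length : Int))) (fun x => x) := by
    rw [hkeys]
    apply max?_id_mem_equiv
    · intro x; simp [PySem.Set.mem_ofList]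
    · intro hnil
      rcases d with _ | ⟨a, t⟩
      · exact hpre rfl
      · have hm : ((a.2.length : Int)) ∈ PySem.Set.ofList ((a :: t).map (fun kv => (kv.2.length : Int))) :=
          (PySem.Set.mem_ofList _ _).mpr (by simp)
        rw [hnil] at hm
        simp at hm
  rcases hA : PySem.List.max? (d.map (fun kv => (kv.2.length : Int))) (fun x => x) with _ | max_length
  · exact absurd (List.map_eq_nil_iff.mp ((PySem.List.max?_eq_none_iff _ _).mp hA)) hpre
  simp only [hmaxeq, hA]
  rw [bucket_getD, foldl_insert_filter]
  rw [PySem.Dict.getD_empty, List.nil_append]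
  rfl
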